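-- pv_equiv track=rewrite | github.com/etnarek/INFO-f-106 | draughtsFunctions.py | countFree
-- ===== SOURCE A (Python) =====
-- def countFree(board, i, j, direction, player=None, length=0):
-- 	"""
-- 	Retourne la distance que peut faire une pièce sans devoir faire une capture.
-- 	"""
-- 	if not player:
-- 		if board[i][j] < 0:
-- 			player = -1
-- 		elif board[i][j] > 0:
-- 			player = 1
-- 	if board[i][j] != 0:
-- 		new_i = i
-- 		new_j = j
-- 		back = 1
-- 		if direction[-1] == 'B' :
-- 			back = -1
--
-- 		if direction[0] == 'L':
-- 			new_i -= (length+1) * player * back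
-- 			new_j -= (length+1) * player
--
-- 		elif direction[0] == 'R':
-- 			new_i -= (length+1) * player * back
-- 			new_j += (length+1) * player
-- 		if 0 <= new_i < len(board) and 0 <= new_j < len(board):
-- 			if board[new_i][new_j] == 0:
-- 				length = countFree(board, i, j, direction, player, length + 1)
-- 	return length
-- ===== SOURCE B (Python) =====
-- def countFree(board, i, j, direction, player=None, length=0):
--     if not player:
--         v = board[i][j]
--         player = -1 if v < 0 else (1 if v > 0 else player)
--     if board[i][j] == 0:
--         return length
--     back = -1 if direction[-1] == 'B' else 1
--     if direction[0] == 'L':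
--         dj = -player
--     elif direction[0] == 'R':
--         dj = player
--     else:
--         return length
--     n = len(board)
--     ni = i - (length + 1) * player * back
--     nj = j + (length + 1) * dj
--     while 0 <= ni < n and 0 <= nj < n and board[ni][nj] == 0:
--         length += 1
--         ni = i - (length + 1) * player * back
--         nj = j + (length + 1) * dj
--     return length
-- ===== Notes on version B (the rewrite author's own statement) =====
-- stated objective: simpler
-- what changed: The tail recursion (which re-derives player, re-checks the start cell and re-parses the direction string on every step) is replaced by early returns that resolve player, start cell and step direction once, followed by a plain while-loop that only advances length.
-- outside the precondition, e.g. on countFree([[1, 1], [0]], 0, 0, 'X', None, 0): A returns 0, B returns 0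
import Mathlib
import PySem

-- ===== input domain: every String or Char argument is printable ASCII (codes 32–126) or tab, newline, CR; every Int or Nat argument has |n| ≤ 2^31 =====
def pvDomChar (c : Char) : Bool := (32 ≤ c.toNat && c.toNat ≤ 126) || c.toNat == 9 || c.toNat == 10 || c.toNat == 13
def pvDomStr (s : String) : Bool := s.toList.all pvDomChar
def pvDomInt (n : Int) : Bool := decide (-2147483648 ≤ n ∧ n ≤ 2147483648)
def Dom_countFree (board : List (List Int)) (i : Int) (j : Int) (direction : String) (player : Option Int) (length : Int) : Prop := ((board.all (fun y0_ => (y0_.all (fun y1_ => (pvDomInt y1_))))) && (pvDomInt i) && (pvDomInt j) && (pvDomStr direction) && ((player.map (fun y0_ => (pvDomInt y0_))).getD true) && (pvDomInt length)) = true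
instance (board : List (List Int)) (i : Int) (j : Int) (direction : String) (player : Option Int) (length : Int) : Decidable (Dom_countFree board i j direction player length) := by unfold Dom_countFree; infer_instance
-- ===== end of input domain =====

-- B replaces A's tail recursion by a single resolution pass plus a while-loop; same values, same cost.


-- shared primitive: `board[i][j]` with Python index semantics; Pre_ guarantees the lookup succeeds,
-- so the `getD 0` default is never reached on admitted inputs.
def pvCell (board : List (List Int)) (i j : Int) : Int :=
  (PySem.List.pyGet? ((PySem.List.pyGet? board i).getD []) j).getD 0

-- ===== PORT A =====
-- A is self-recursive with increasing `length`; ported with fuel `board.length + 1`, which is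
-- enough on admitted inputs (each recursive step visits a fresh row/column index in [0, n)).
def countFreeA (board : List (List Int)) (i j : Int) (direction : String) :
    Option Int → Int → Nat → Int
  | _, length, 0 => length
  | player, length, Nat.succ fuel =>
    let player :=
      if player.getD 0 = 0 then          -- Python `not player`: None or 0
        if pvCell board i j < 0 then some (-1 : Int)
        else if pvCell board i j > 0 then some (1 : Int)
        else player
      else player
    if pvCell board i j ≠ 0 then
      let back : Int := if (PySem.Str.pyGet? direction (-1)).getD ' ' = 'B' then -1 else 1
      let p := player.getD 0
      let nij :=
        if (PySem.Str.pyGet? direction 0).getD ' ' = 'L' then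
          (i - (length + 1) * p * back, j - (length + 1) * p)
        else if (PySem.Str.pyGet? direction 0).getD ' ' = 'R' then
          (i - (length + 1) * p * back, j + (length + 1) * p)
        else (i, j)
      if 0 ≤ nij.1 ∧ nij.1 < (board.length : Int) ∧ 0 ≤ nij.2 ∧ nij.2 < (board.length : Int) then
        if pvCell board nij.1 nij.2 = 0 then
          countFreeA board i j direction player (length + 1) fuel
        else length
      else length
    else length

def countFree (board : List (List Int)) (i : Int) (j : Int) (direction : String) (player : Option Int) (length : Int) : Int :=
  countFreeA board i j direction player length (board.length + 1)

-- ===== PORT B =====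
-- the while-loop of Source B, with the same fuel bound (the loop body runs at most n times on admitted inputs)
def pvLoopB (board : List (List Int)) (i j p back dj : Int) : Int → Nat → Int
  | length, 0 => length
  | length, Nat.succ fuel =>
    let ni := i - (length + 1) * p * back
    let nj := j + (length + 1) * dj
    if 0 ≤ ni ∧ ni < (board.length : Int) ∧ 0 ≤ nj ∧ nj < (board.length : Int) ∧
        pvCell board ni nj = 0 then
      pvLoopB board i j p back dj (length + 1) fuel
    else length

def countFree_alt (board : List (List Int)) (i : Int) (j : Int) (direction : String) (player : Option Int) (length : Int) : Int :=
  let v := pvCell board i j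
  let p : Int :=
    if player.getD 0 = 0 then (if v < 0 then -1 else if v > 0 then 1 else 0)
    else player.getD 0
  if v = 0 then length
  else
    let back : Int := if (PySem.Str.pyGet? direction (-1)).getD ' ' = 'B' then -1 else 1
    let d0 := (PySem.Str.pyGet? direction 0).getD ' '
    if d0 = 'L' then pvLoopB board i j p back (-p) length (board.length + 1)
    else if d0 = 'R' then pvLoopB board i j p back p length (board.length + 1)
    else length

-- ===== PRECONDITION & SPEC =====
-- Pre_ excludes: (a) an out-of-range initial (i, j), where board[i][j] raises IndexError; and, when the
-- start cell is nonzero (a zero start cell returns immediately, so nothing else can raise there),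
-- (b) ragged boards (a row shorter than len(board)), where the bound check against len(board) lets the
-- scan raise IndexError mid-loop (on some such boards both programs still return, always agreeing), and
-- (c) an empty direction string, where direction[-1] raises IndexError.
def Pre_countFree (board : List (List Int)) (i : Int) (j : Int) (direction : String) (player : Option Int) (length : Int) : Prop :=
  (-(board.length : Int) ≤ i ∧ i < (board.length : Int)) ∧
  (-((((PySem.List.pyGet? board i).getD []).length : Int)) ≤ j ∧
    j < (((PySem.List.pyGet? board i).getD []).length : Int)) ∧
  (pvCell board i j = 0 ∨
    ((∀ row ∈ board, board.length ≤ row.length) ∧ direction ≠ ""))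
instance (board : List (List Int)) (i : Int) (j : Int) (direction : String) (player : Option Int) (length : Int) : Decidable (Pre_countFree board i j direction player length) := by unfold Pre_countFree; infer_instance

def pvWitness_countFree : List (List Int) × Int × Int × String × Option Int × Int :=
  ([[1, 0], [0, 0]], 0, 0, "RF", none, 0)

def Spec_countFree (board : List (List Int)) (i : Int) (j : Int) (direction : String) (player : Option Int) (length : Int) (out : Int) : Prop := out = countFree_alt board i j direction player length
instance (board : List (List Int)) (i : Int) (j : Int) (direction : String) (player : Option Int) (length : Int) (out : Int) : Decidable (Spec_countFree board i j direction player length out) := by unfold Spec_countFree; infer_instance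

-- ===== CLAIM (what is proved, stated in full; the proofs are below) =====
def Claim_equal_countFree : Prop := ∀ (board : List (List Int)) (i : Int) (j : Int) (direction : String) (player : Option Int) (length : Int), Dom_countFree board i j direction player length → Pre_countFree board i j direction player length → Spec_countFree board i j direction player length (countFree board i j direction player length)

-- ===== LEMMAS AND PROOFS =====

-- once the player is resolved to a fixed `some p`, A's recursion is exactly B's loop
set_option maxHeartbeats 1000000 in
lemma countFreeA_eq_loop (board : List (List Int)) (i j : Int) (direction : String) (p : Int)
    (hp : p ≠ 0) (hv : pvCell board i j ≠ 0) :
    ∀ (fuel : Nat) (length : Int),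
      countFreeA board i j direction (some p) length fuel =
        (let back : Int := if (PySem.Str.pyGet? direction (-1)).getD ' ' = 'B' then -1 else 1
         let d0 := (PySem.Str.pyGet? direction 0).getD ' '
         if d0 = 'L' then pvLoopB board i j p back (-p) length fuel
         else if d0 = 'R' then pvLoopB board i j p back p length fuel
         else length) := by
  intro fuel
  induction fuel with
  | zero =>
    intro length
    simp only [countFreeA, pvLoopB]
    split_ifs <;> rfl
  | succ fuel ih =>
    intro length
    have hmj : ∀ l : Int, j + (l + 1) * -p = j - (l + 1) * p := fun l => by ring
    simp only [countFreeA, pvLoopB, Option.getD_some, if_neg hp, if_pos hv, hmj]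
    by_cases hB : (PySem.Str.pyGet? direction (-1)).getD ' ' = 'B'
    · simp only [if_pos hB]
      by_cases hL : (PySem.Str.pyGet? direction 0).getD ' ' = 'L'
      · simp only [if_pos hL]
        split_ifs <;> first | rfl | (exfalso; tauto) | (rw [ih]; simp only [hB, hL]; simp)
      · by_cases hR : (PySem.Str.pyGet? direction 0).getD ' ' = 'R'
        · simp only [if_neg hL, if_pos hR]
          split_ifs <;> first | rfl | (exfalso; tauto) | (rw [ih]; simp only [hB, hL, hR]; simp)
        · simp only [if_neg hL, if_neg hR]
          split_ifs <;> first | rfl | (exfalso; tauto)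
    · simp only [if_neg hB]
      by_cases hL : (PySem.Str.pyGet? direction 0).getD ' ' = 'L'
      · simp only [if_pos hL]
        split_ifs <;> first | rfl | (exfalso; tauto) | (rw [ih]; simp only [hB, hL]; simp)
      · by_cases hR : (PySem.Str.pyGet? direction 0).getD ' ' = 'R'
        · simp only [if_neg hL, if_pos hR]
          split_ifs <;> first | rfl | (exfalso; tauto) | (rw [ih]; simp only [hB, hL, hR]; simp)
        · simp only [if_neg hL, if_neg hR]
          split_ifs <;> first | rfl | (exfalso; tauto)

-- ===== VERDICT (by name: the statement is the Claim_ definition above) =====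
theorem countFree_spec : Claim_equal_countFree := by
  intro board i j direction player length _ _
  unfold Spec_countFree countFree
  by_cases hv : pvCell board i j = 0
  · -- start cell is 0: A's guard fails at the first step, B returns early
    have hA : countFreeA board i j direction player length (board.length + 1) = length := by
      simp [countFreeA, hv]
    rw [hA]
    simp [countFree_alt, hv]
  · -- start cell nonzero: resolve the player once, then both sides run the same loop
    have hp : (if player.getD 0 = 0 then
          (if pvCell board i j < 0 then (-1 : Int) else if pvCell board i j > 0 then 1 else 0)
        else player.getD 0) ≠ 0 := by
      split_ifs with h h1 h2 <;> simp_all <;> omega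
    have hresolve :
        countFreeA board i j direction player length (board.length + 1) =
        countFreeA board i j direction
          (some (if player.getD 0 = 0 then
              (if pvCell board i j < 0 then (-1 : Int) else if pvCell board i j > 0 then 1 else 0)
            else player.getD 0)) length (board.length + 1) := by
      by_cases h0 : player.getD 0 = 0
      · simp only [countFreeA, h0, if_pos, Option.getD_some, if_neg hp, if_true]
        rcases lt_trichotomy (pvCell board i j) 0 with hlt | heq | hgt
        · simp [hlt]
        · exact absurd heq hv
        · simp [hgt, hgt.not_gt]
      · have hps : player = some (player.getD 0) := by
          cases player with
          | none => simp at h0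
          | some q => rfl
        conv_lhs => rw [hps]
        simp only [if_neg h0]
    rw [hresolve, countFreeA_eq_loop _ _ _ _ _ hp hv]
    simp [countFree_alt, hv]
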